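-- pv_equiv track=rewrite | github.com/Dyc233/arxiv-assistant | search/utils.py | filter_by_metadata
-- ===== SOURCE A (Python) =====
-- from typing import Any
--
-- def simple_text_match(query: str, text: str) -> bool:
--     """简单的文本匹配：不区分大小写的包含关系"""
--     if not query or not text:
--         return False
--     return query.lower() in text.lower()
--
-- def filter_by_metadata(
--     papers: list[dict[str, Any]],
--     title: str | None = None,
--     authors: str | None = None,
--     categories: str | None = None,
--     comment: str | None = None,
-- ) -> list[dict[str, Any]]:
--     """简单的元数据过滤：基于字符串包含关系"""
--     filtered = papers
--
--     if title:
--         filtered = [p for p in filtered if simple_text_match(title, p.get("title", ""))]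
--
--     if authors:
--         filtered = [p for p in filtered if any(simple_text_match(a.strip(), p.get("authors", "")) for a in authors.split(","))]
--
--     if categories:
--         filtered = [p for p in filtered if any(simple_text_match(c.strip(), p.get("categories", "")) for c in categories.split(","))]
--
--     if comment:
--         filtered = [p for p in filtered if any(simple_text_match(c.strip(), p.get("comment", "")) for c in comment.split(","))]
--
--     return filtered
-- ===== SOURCE B (Python) =====
-- def filter_by_metadata(papers, title=None, authors=None, categories=None, comment=None):
--     # Compile the active filters once into (field, lowered-needle list) specs,
--     # then make a single pass over papers checking each spec.
--     specs = []
--     if title: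
--         specs.append(("title", [title.lower()]))
--     for field, q in (("authors", authors), ("categories", categories), ("comment", comment)):
--         if q:
--             specs.append((field, [part.strip().lower() for part in q.split(",")]))
--     out = []
--     for p in papers:
--         for field, needles in specs:
--             text = p.get(field, "").lower()
--             if not text or not any(n and n in text for n in needles):
--                 break
--         else:
--             out.append(p)
--     return out
-- ===== Notes on version B (the rewrite author's own statement) =====
-- stated objective: alternative
-- what changed: Compiles the active filters once into a table of (field, lowered-needle-list) specs (split/strip/lower done once up front), then a single pass over papers lowers each relevant field once and tests all specs, instead of A's four sequential filter passes that re-split and re-lower the query per paper.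
import Mathlib
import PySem

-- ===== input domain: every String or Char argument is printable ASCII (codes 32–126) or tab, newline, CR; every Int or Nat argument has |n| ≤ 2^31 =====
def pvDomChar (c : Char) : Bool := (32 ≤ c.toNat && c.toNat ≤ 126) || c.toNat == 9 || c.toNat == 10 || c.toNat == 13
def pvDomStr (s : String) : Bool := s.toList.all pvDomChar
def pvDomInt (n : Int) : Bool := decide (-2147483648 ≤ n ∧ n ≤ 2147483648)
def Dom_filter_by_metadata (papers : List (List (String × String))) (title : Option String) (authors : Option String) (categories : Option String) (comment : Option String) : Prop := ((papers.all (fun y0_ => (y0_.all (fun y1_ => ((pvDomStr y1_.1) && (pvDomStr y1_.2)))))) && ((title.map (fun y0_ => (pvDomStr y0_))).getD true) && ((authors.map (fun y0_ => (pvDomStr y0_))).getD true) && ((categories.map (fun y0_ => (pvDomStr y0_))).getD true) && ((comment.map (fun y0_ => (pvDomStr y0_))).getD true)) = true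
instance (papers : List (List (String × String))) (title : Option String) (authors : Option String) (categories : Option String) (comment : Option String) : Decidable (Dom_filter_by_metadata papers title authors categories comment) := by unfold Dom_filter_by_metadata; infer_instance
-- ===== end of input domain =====

-- B compiles the active filters once into a (field, lowered-needle list) table and makes a
-- single pass over papers, instead of A's four sequential filter passes (alternative decomposition).

-- ===== PORT A =====
def simple_text_match (query text : String) : Bool :=
  if query = "" || text = "" then false
  else PySem.Str.isIn (PySem.Str.lower query) (PySem.Str.lower text)

-- Python truthiness of a `str | None` parameter: None and "" are falsy
def pyTruthy (o : Option String) : Bool :=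
  match o with
  | none => false
  | some s => !(s = "")

-- any(simple_text_match(x.strip(), field) for x in q.split(",")); sep "," nonempty so split? is some
def anySplitMatch (q field : String) : Bool :=
  ((PySem.Str.split? q ",").getD []).any (fun x => simple_text_match (PySem.Str.strip x) field)

def filter_by_metadata (papers : List (List (String × String))) (title : Option String) (authors : Option String) (categories : Option String) (comment : Option String) : List (List (String × String)) :=
  let filtered := papers
  let filtered := if pyTruthy title then
      filtered.filter (fun p => simple_text_match (title.getD "") (PySem.Dict.getD (PySem.Dict.mk p) "title" ""))
    else filtered
  let filtered := if pyTruthy authors then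
      filtered.filter (fun p => anySplitMatch (authors.getD "") (PySem.Dict.getD (PySem.Dict.mk p) "authors" ""))
    else filtered
  let filtered := if pyTruthy categories then
      filtered.filter (fun p => anySplitMatch (categories.getD "") (PySem.Dict.getD (PySem.Dict.mk p) "categories" ""))
    else filtered
  let filtered := if pyTruthy comment then
      filtered.filter (fun p => anySplitMatch (comment.getD "") (PySem.Dict.getD (PySem.Dict.mk p) "comment" ""))
    else filtered
  filtered

-- ===== PORT B =====
-- [part.strip().lower() for part in q.split(",")]
def compileMulti (q : String) : List String :=
  ((PySem.Str.split? q ",").getD []).map (fun part => PySem.Str.lower (PySem.Str.strip part))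

-- the inner loop body: text = p.get(field,"").lower(); not-break iff text and any(n and n in text ...)
def specMatch (needles : List String) (text : String) : Bool :=
  let tl := PySem.Str.lower text
  (!(tl = "")) && needles.any (fun n => (!(n = "")) && PySem.Str.isIn n tl)

def filter_by_metadata_alt (papers : List (List (String × String))) (title : Option String) (authors : Option String) (categories : Option String) (comment : Option String) : List (List (String × String)) :=
  let specs : List (String × List String) := []
  let specs := if pyTruthy title then specs ++ [("title", [PySem.Str.lower (title.getD "")])] else specs
  let specs := if pyTruthy authors then specs ++ [("authors", compileMulti (authors.getD ""))] else specs
  let specs := if pyTruthy categories then specs ++ [("categories", compileMulti (categories.getD ""))] else specs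
  let specs := if pyTruthy comment then specs ++ [("comment", compileMulti (comment.getD ""))] else specs
  -- for p in papers: the for/break/else over specs appends p iff every spec matches
  papers.foldl (fun out p =>
    if specs.all (fun spec => specMatch spec.2 (PySem.Dict.getD (PySem.Dict.mk p) spec.1 "")) then
      out ++ [p]
    else out) []

-- ===== PRECONDITION & SPEC =====
def Spec_filter_by_metadata (papers : List (List (String × String))) (title : Option String) (authors : Option String) (categories : Option String) (comment : Option String) (out : List (List (String × String))) : Prop := out = filter_by_metadata_alt papers title authors categories comment
instance (papers : List (List (String × String))) (title : Option String) (authors : Option String) (categories : Option String) (comment : Option String) (out : List (List (String × String))) : Decidable (Spec_filter_by_metadata papers title authors categories comment out) := by unfold Spec_filter_by_metadata; infer_instance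

-- ===== CLAIM (what is proved, stated in full; the proofs are below) =====
def Claim_equal_filter_by_metadata : Prop := ∀ (papers : List (List (String × String))) (title : Option String) (authors : Option String) (categories : Option String) (comment : Option String), Dom_filter_by_metadata papers title authors categories comment → Spec_filter_by_metadata papers title authors categories comment (filter_by_metadata papers title authors categories comment)

-- ===== LEMMAS AND PROOFS =====

-- lowering an (ASCII or not) string preserves emptiness
theorem lower_eq_empty_iff (s : String) : (PySem.Str.lower s = "") ↔ s = "" := by
  constructor <;> intro h
  · have := congrArg String.toList h
    simp [PySem.Str.toList_lower, PySem.Chars.lower] at this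
    exact this
  · subst h; rfl

-- the append-accumulator fold is List.filter
theorem foldl_keep_eq_filter {α : Type} (q : α → Bool) (l : List α) :
    l.foldl (fun out p => if q p then out ++ [p] else out) [] = l.filter q := by
  simpa using PySem.List.foldl_append_if q id l []

-- an inactive pass is a filter by a vacuously-true predicate
theorem gate_filter_eq {α : Type} (b : Bool) (f : α → Bool) (l : List α) :
    (if b then l.filter f else l) = l.filter (fun x => !b || f x) := by
  cases b <;> simp

theorem and_any_distrib {α : Type} (b : Bool) (f : α → Bool) (l : List α) :
    (b && l.any f) = l.any (fun x => b && f x) := by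
  cases b <;> simp

theorem specMatch_single (t text : String) :
    specMatch [PySem.Str.lower t] text = simple_text_match t text := by
  simp only [specMatch, simple_text_match, List.any_cons, List.any_nil]
  by_cases ht : t = "" <;> by_cases htx : text = "" <;>
    simp [ht, htx, lower_eq_empty_iff, Bool.and_comm]

theorem specMatch_multi (q text : String) :
    specMatch (compileMulti q) text = anySplitMatch q text := by
  simp only [specMatch, compileMulti, anySplitMatch, List.any_map, and_any_distrib]
  refine List.any_congr rfl (fun x => ?_)
  simp only [Function.comp, simple_text_match]
  by_cases hs : PySem.Str.strip x = "" <;> by_cases htx : text = "" <;>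
    simp [hs, htx, lower_eq_empty_iff, Bool.and_comm]

-- ===== VERDICT (by name: the statement is the Claim_ definition above) =====
theorem filter_by_metadata_spec : Claim_equal_filter_by_metadata := by
  intro papers title authors categories comment _
  unfold Spec_filter_by_metadata filter_by_metadata filter_by_metadata_alt
  simp only [foldl_keep_eq_filter, gate_filter_eq, List.filter_filter]
  cases pyTruthy title <;> cases pyTruthy authors <;>
    cases pyTruthy categories <;> cases pyTruthy comment <;>
    simp [List.filter_filter, specMatch_single, specMatch_multi,
      Bool.and_assoc, Bool.and_comm, Bool.and_left_comm]
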